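-- pv_equiv track=rewrite | github.com/adas1236/CyclicFinetune | reward.py | _combine_arcs
-- ===== SOURCE A (Python) =====
-- def _combine_arcs(arc_labels: list[str]) -> str:
--     if not arc_labels:
--         raise ValueError("Need at least one pairwise arc to combine.")
--     if all(a == "clockwise" for a in arc_labels):
--         return "clockwise"
--     if all(a == "counterclockwise" for a in arc_labels):
--         return "counterclockwise"
--     return "neither"
-- ===== SOURCE B (Python) =====
-- def _combine_arcs(arc_labels: list[str]) -> str:
--     if not arc_labels:
--         raise ValueError("Need at least one pairwise arc to combine.")
--     consensus = arc_labels[0]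
--     for a in arc_labels[1:]:
--         if a != consensus:
--             return "neither"
--     return consensus if consensus in ("clockwise", "counterclockwise") else "neither"
-- ===== Notes on version B (the rewrite author's own statement) =====
-- stated objective: alternative
-- what changed: Instead of two all() scans against the two constant labels, B makes one pass comparing every label to the first, early-returning 'neither' on the first mismatch, and only at the end checks whether the agreed-upon label is one of the two valid directions.
import Mathlib
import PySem

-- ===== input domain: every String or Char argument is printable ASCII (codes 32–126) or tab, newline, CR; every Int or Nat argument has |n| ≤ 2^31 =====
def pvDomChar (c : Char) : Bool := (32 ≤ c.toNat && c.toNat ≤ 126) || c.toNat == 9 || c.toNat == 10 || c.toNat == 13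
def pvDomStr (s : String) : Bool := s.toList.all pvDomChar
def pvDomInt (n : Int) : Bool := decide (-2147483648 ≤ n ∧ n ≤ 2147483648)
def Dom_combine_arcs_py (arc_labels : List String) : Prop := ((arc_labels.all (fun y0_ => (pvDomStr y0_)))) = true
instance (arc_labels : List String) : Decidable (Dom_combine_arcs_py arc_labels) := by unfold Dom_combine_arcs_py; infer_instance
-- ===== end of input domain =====

-- B replaces A's two all() scans against the constant labels by one pass comparing every
-- label to the first (early 'neither' on a mismatch), checking the agreed label only at the end.

-- ===== PORT A =====
def combine_arcs_py (arc_labels : List String) : String :=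
  if arc_labels.isEmpty then ""   -- Python raises ValueError here; excluded by Pre_
  else if arc_labels.all (fun a => a == "clockwise") then "clockwise"
  else if arc_labels.all (fun a => a == "counterclockwise") then "counterclockwise"
  else "neither"

-- ===== PORT B =====
-- the for-loop of Source B with its early return, as structural recursion over the tail
def pvConsensusLoop (consensus : String) : List String → String
  | [] => if consensus == "clockwise" || consensus == "counterclockwise" then consensus else "neither"
  | a :: rest => if a != consensus then "neither" else pvConsensusLoop consensus rest

def combine_arcs_py_alt (arc_labels : List String) : String :=
  match arc_labels with
  | [] => ""   -- Python raises ValueError here; excluded by Pre_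
  | c :: rest => pvConsensusLoop c rest

-- ===== PRECONDITION & SPEC =====
-- A (and B) raise ValueError on the empty list; Pre_ excludes exactly that.
def Pre_combine_arcs_py (arc_labels : List String) : Prop := arc_labels ≠ []
instance (arc_labels : List String) : Decidable (Pre_combine_arcs_py arc_labels) := by unfold Pre_combine_arcs_py; infer_instance
def pvWitness_combine_arcs_py : List String := (["clockwise", "neither"])
def Spec_combine_arcs_py (arc_labels : List String) (out : String) : Prop := out = combine_arcs_py_alt arc_labels
instance (arc_labels : List String) (out : String) : Decidable (Spec_combine_arcs_py arc_labels out) := by unfold Spec_combine_arcs_py; infer_instance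

-- ===== CLAIM (what is proved, stated in full; the proofs are below) =====
def Claim_equal_combine_arcs_py : Prop := ∀ (arc_labels : List String), Dom_combine_arcs_py arc_labels → Pre_combine_arcs_py arc_labels → Spec_combine_arcs_py arc_labels (combine_arcs_py arc_labels)

-- ===== LEMMAS AND PROOFS =====

-- the loop's result, characterised by a tail-wide all() over the fixed consensus label
theorem pvConsensusLoop_eq (c : String) (rest : List String) :
    pvConsensusLoop c rest =
      if rest.all (fun a => a == c)
      then (if c == "clockwise" || c == "counterclockwise" then c else "neither")
      else "neither" := by
  induction rest with
  | nil => simp [pvConsensusLoop]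
  | cons a t ih =>
    simp only [pvConsensusLoop, List.all_cons]
    by_cases h : a = c
    · simp [h, ih]
    · simp [h, bne_iff_ne, Ne]

-- ===== VERDICT (by name: the statement is the Claim_ definition above) =====
theorem combine_arcs_py_spec : Claim_equal_combine_arcs_py := by
  intro l _ hpre
  unfold Spec_combine_arcs_py
  match l with
  | [] => exact absurd rfl hpre
  | c :: rest =>
    simp only [combine_arcs_py, combine_arcs_py_alt, pvConsensusLoop_eq, List.isEmpty_cons,
      List.all_cons, Bool.false_eq_true, if_false]
    by_cases hc : c = "clockwise"
    · subst hc
      by_cases ht : rest.all (fun a => a == "clockwise")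
      · simp [ht]
      · simp [ht]
    · by_cases hcc : c = "counterclockwise"
      · subst hcc
        by_cases ht : rest.all (fun a => a == "counterclockwise")
        · simp [ht]
        · simp [ht]
      · simp [hc, hcc]
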